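-- pv_equiv track=rewrite | github.com/luismendezescobar/myproy | python/first_last_index.py | solution
-- ===== SOURCE A (Python) =====
-- def solution(nums,target):
--     output1=[]
--     output2=[]
--     for i in range(len(nums)):
--         if nums[i]==target:
--             output1.append(i)
--
--
--     if len(output1)>2:
--         output2.append(output1[0])
--         output2.append(output1[len(output1)-1])
--         return output2
--     else:
--         return output1
-- ===== SOURCE B (Python) =====
-- def solution(nums, target):
--     c = nums.count(target)
--     if c == 0:
--         return []
--     first = nums.index(target)
--     if c == 1:
--         return [first]
--     last = len(nums) - 1 - nums[::-1].index(target)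
--     return [first, last]
-- ===== Notes on version B (the rewrite author's own statement) =====
-- stated objective: simpler
-- what changed: B never builds the list of all matching indices: it counts the matches once, then fetches only the first index (nums.index) and, when the count is >= 2, the last index via a reverse scan, branching on the count instead of trimming a collected list.
import Mathlib
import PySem

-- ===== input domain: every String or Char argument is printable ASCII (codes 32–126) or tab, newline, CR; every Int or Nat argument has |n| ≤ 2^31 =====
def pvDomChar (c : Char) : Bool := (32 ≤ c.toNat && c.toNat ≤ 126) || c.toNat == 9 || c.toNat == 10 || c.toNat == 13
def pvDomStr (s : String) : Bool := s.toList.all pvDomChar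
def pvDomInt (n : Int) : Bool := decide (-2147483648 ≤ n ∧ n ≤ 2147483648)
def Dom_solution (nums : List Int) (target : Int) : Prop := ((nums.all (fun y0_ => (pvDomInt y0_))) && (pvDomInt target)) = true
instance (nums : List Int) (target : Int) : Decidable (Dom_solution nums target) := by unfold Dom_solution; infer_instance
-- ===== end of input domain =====

-- B replaces A's collect-all-indices loop by a count plus first/last lookups (different decomposition, same O(n) cost).

-- ===== PORT A =====
def solution (nums : List Int) (target : Int) : List Int :=
  let output1 : List Int :=
    (PySem.List.pyRange 0 (nums.length : Int) 1).foldl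
      (fun acc i => if PySem.List.pyGetD nums i 0 = target then acc ++ [i] else acc) []
  if output1.length > 2 then
    [PySem.List.pyGetD output1 0 0,
     PySem.List.pyGetD output1 ((output1.length : Int) - 1) 0]
  else
    output1

-- ===== PORT B =====
-- nums[::-1] is ported as List.reverse (exact: PySem.List.slice?_none_none_neg_one);
-- nums.index(...) is PySem.List.index?, guarded by the count so the .getD default is never used.
def solution_alt (nums : List Int) (target : Int) : List Int :=
  let c := PySem.List.count nums target
  if c = 0 then []
  else
    let first : Int := ((PySem.List.index? nums target).getD 0 : Nat)
    if c = 1 then [first]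
    else
      let last : Int :=
        (nums.length : Int) - 1 - (((PySem.List.index? nums.reverse target).getD 0 : Nat) : Int)
      [first, last]

-- ===== PRECONDITION & SPEC =====
def Spec_solution (nums : List Int) (target : Int) (out : List Int) : Prop := out = solution_alt nums target
instance (nums : List Int) (target : Int) (out : List Int) : Decidable (Spec_solution nums target out) := by unfold Spec_solution; infer_instance

-- ===== CLAIM (what is proved, stated in full; the proofs are below) =====
def Claim_equal_solution : Prop := ∀ (nums : List Int) (target : Int), Dom_solution nums target → Spec_solution nums target (solution nums target)

-- ===== LEMMAS AND PROOFS =====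

-- the (Nat) indices of elements equal to target, in increasing order
def pvIdxs (nums : List Int) (target : Int) : List Nat :=
  (List.range nums.length).filter (fun k => nums.getD k 0 = target)

def pvCast (l : List Nat) : List Int := List.map (fun k : Nat => (k : Int)) l

-- A's accumulation loop builds exactly pvIdxs, cast to Int
theorem pvOutput1_eq (nums : List Int) (target : Int) :
    (PySem.List.pyRange 0 (nums.length : Int) 1).foldl
      (fun acc i => if PySem.List.pyGetD nums i 0 = target then acc ++ [i] else acc) []
    = pvCast (pvIdxs nums target) := by
  rw [PySem.List.pyRange_one]
  simp only [Int.sub_zero, Int.toNat_natCast, zero_add, List.foldl_map]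
  have h := PySem.List.foldl_append_if
      (fun k : Nat => decide (PySem.List.pyGetD nums (k : Int) 0 = target))
      (fun k : Nat => (k : Int)) (List.range nums.length) []
  simp only [decide_eq_true_eq] at h
  rw [h]
  simp only [List.nil_append, pvIdxs, pvCast]
  have hfc : List.filter (fun k : Nat => decide (PySem.List.pyGetD nums (k : Int) 0 = target)) (List.range nums.length)
      = List.filter (fun k : Nat => decide (nums.getD k 0 = target)) (List.range nums.length) :=
    List.filter_congr (by intro k _; simp [PySem.List.pyGetD_natCast])
  rw [hfc]

-- count of target = number of matching indices
theorem pvCount_eq (nums : List Int) (target : Int) :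
    PySem.List.count nums target = (pvIdxs nums target).length := by
  rw [PySem.List.count_eq]
  induction nums with
  | nil => simp [pvIdxs]
  | cons x xs ih =>
      simp only [pvIdxs, List.length_cons, List.range_succ_eq_map, List.filter_cons,
        List.filter_map, List.count_cons, List.getD_cons_zero, Function.comp_def,
        List.getD_cons_succ] at *
      by_cases hx : x = target
      · simp [hx, ih]
      · simp [hx, ih]

-- first match: idxOf? = head of the index list
theorem pvHead_eq (nums : List Int) (target : Int) :
    List.idxOf? target nums = (pvIdxs nums target).head? := by
  induction nums with
  | nil => simp [pvIdxs]
  | cons x xs ih =>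
      simp only [pvIdxs, List.length_cons, List.range_succ_eq_map, List.filter_cons,
        List.filter_map, List.getD_cons_zero, Function.comp_def, List.getD_cons_succ] at *
      by_cases hx : x = target
      · simp [hx, List.idxOf?_cons]
      · simpa [hx, Ne.symm hx, List.idxOf?_cons, List.head?_map] using congrArg (Option.map Nat.succ) ih

-- last match: first index of target in the reversed list, mirrored
theorem pvLast_eq (nums : List Int) (target : Int) :
    (pvIdxs nums target).getLast? =
      (List.idxOf? target nums.reverse).map (fun j => nums.length - 1 - j) := by
  induction nums using List.reverseRecOn with
  | nil => simp [pvIdxs]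
  | append_singleton ys y ih =>
      simp only [pvIdxs, List.length_append, List.length_singleton, List.range_succ,
        List.filter_append, List.filter_cons, List.filter_nil, List.reverse_append,
        List.reverse_singleton, List.singleton_append] at *
      have hg : List.filter (fun k => decide ((ys ++ [y]).getD k 0 = target)) (List.range ys.length)
          = List.filter (fun k => decide (ys.getD k 0 = target)) (List.range ys.length) :=
        List.filter_congr (by
          intro k hk
          simp only [decide_eq_decide]
          rw [List.getD_append _ _ _ _ (List.mem_range.mp hk)])
      rw [hg]
      have hy : (ys ++ [y]).getD ys.length 0 = y := by
        rw [List.getD_append_right _ _ _ _ (le_refl _)]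
        simp
      rw [hy, List.idxOf?_cons]
      by_cases hx : y = target
      · simp [hx]
      · simp only [decide_eq_true_eq, beq_iff_eq, if_neg hx, List.append_nil,
          ih, Option.map_map]
        congr 1
        funext j
        simp only [Function.comp_apply]
        omega

-- any index returned by idxOf? on the reverse is in range
theorem pvRevIdx_lt (nums : List Int) (target : Int) (j : Nat)
    (h : List.idxOf? target nums.reverse = some j) : j < nums.length := by
  have := PySem.List.index?_eq_some_iff (xs := nums.reverse) (v := target) (k := j)
  rw [PySem.List.index?_eq_idxOf?] at this
  obtain ⟨pre, suf, hsplit, hlen, -⟩ := this.mp h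
  have : nums.reverse.length = pre.length + suf.length + 1 := by simp [hsplit]; omega
  simp only [List.length_reverse] at this
  omega

-- ===== VERDICT (by name: the statement is the Claim_ definition above) =====
theorem solution_spec : Claim_equal_solution := by
  intro nums target _
  unfold Spec_solution solution solution_alt
  rw [pvOutput1_eq, PySem.List.index?_eq_idxOf?, PySem.List.index?_eq_idxOf?,
    pvCount_eq, pvHead_eq]
  have hlast := pvLast_eq nums target
  cases hF : pvIdxs nums target with
  | nil => simp [pvCast]
  | cons k tl =>
    rw [hF] at hlast
    obtain ⟨j, hj, hjlast⟩ : ∃ j, List.idxOf? target nums.reverse = some j ∧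
        (k :: tl).getLast? = some (nums.length - 1 - j) := by
      cases hjo : List.idxOf? target nums.reverse with
      | none => rw [hjo] at hlast; simp at hlast
      | some j => exact ⟨j, rfl, by rw [hlast, hjo]; rfl⟩
    have hjlt : j < nums.length := pvRevIdx_lt nums target j hj
    have hcast : ((nums.length : Int)) - 1 - (j : Int) = ((nums.length - 1 - j : Nat) : Int) := by
      omega
    cases tl with
    | nil =>
        simp [pvCast]
    | cons k2 tl2 =>
      cases tl2 with
      | nil =>
          -- exactly two matches: A returns the whole list, B returns [first, last]
          simp only [List.getLast?_cons_cons, List.getLast?_singleton, Option.some_inj] at hjlast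
          simp [pvCast, hj, hcast, ← hjlast]
      | cons k3 tl3 =>
          -- three or more matches
          have hlen : (pvCast (k :: k2 :: k3 :: tl3)).length = tl3.length + 3 := by
            simp [pvCast]
          have hfirst : PySem.List.pyGetD (pvCast (k :: k2 :: k3 :: tl3)) 0 0 = (k : Int) := by
            rw [PySem.List.pyGetD_ofNat']
            simp [pvCast]
          have hlast2 : PySem.List.pyGetD (pvCast (k :: k2 :: k3 :: tl3))
              (((pvCast (k :: k2 :: k3 :: tl3)).length : Int) - 1) 0
              = ((nums.length - 1 - j : Nat) : Int) := by
            have h1 : (((pvCast (k :: k2 :: k3 :: tl3)).length : Int) - 1)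
                = (((pvCast (k :: k2 :: k3 :: tl3)).length - 1 : Nat) : Int) := by
              rw [hlen]; push_cast; omega
            rw [h1, PySem.List.pyGetD_natCast, List.getD_eq_getElem?_getD,
              ← List.getLast?_eq_getElem?]
            have : (pvCast (k :: k2 :: k3 :: tl3)).getLast? = some ((nums.length - 1 - j : Nat) : Int) := by
              simp only [pvCast, List.getLast?_map, hjlast, Option.map_some]
            rw [this]
            rfl
          simp only [hlen, hfirst, hj]
          simp
          rw [show ((tl3.length : Int) + 3 - 1) = (((pvCast (k :: k2 :: k3 :: tl3)).length : Int) - 1) from by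
            rw [hlen]; push_cast; ring]
          rw [hlast2, hcast]
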